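-- pv_equiv track=rewrite | github.com/sshipra319/leetcode | alphabetsmallestString.py | lexSmallest
-- ===== SOURCE A (Python) =====
-- import collections
--
-- def lexSmallest(a):
--     dic = {}
--     for i in a:
--         split_str = list(i)
--         min_ord = ord(split_str[0])
--         for j in range(1,len(split_str)):
--             min_ord = min(min_ord,ord(split_str[j]))
--
--         if(min_ord in dic):
--             dic[min_ord].append(i)
--         else:
--             dic[min_ord] = [i]
--     for i in dic:
--         if(len(dic[i]) > 1):
--             dic[i].sort()
--     dic = collections.OrderedDict(sorted(dic.items()))
--     res = ''
--     for i in dic: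
--         for j in (dic[i]):
--             res += j
--
--     return res
-- ===== SOURCE B (Python) =====
-- def lexSmallest(a):
--     # one global stable sort with composite key: smallest char first, then the string itself
--     return ''.join(sorted(a, key=lambda s: min(s) + s))
-- ===== Notes on version B (the rewrite author's own statement) =====
-- stated objective: simpler
-- what changed: Replaces the dict-grouping by min-ord, per-group sorts, OrderedDict rebuild and nested concatenation loops with a single stable sort of the whole list under the composite key min(s)+s, then one join.
import Mathlib
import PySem

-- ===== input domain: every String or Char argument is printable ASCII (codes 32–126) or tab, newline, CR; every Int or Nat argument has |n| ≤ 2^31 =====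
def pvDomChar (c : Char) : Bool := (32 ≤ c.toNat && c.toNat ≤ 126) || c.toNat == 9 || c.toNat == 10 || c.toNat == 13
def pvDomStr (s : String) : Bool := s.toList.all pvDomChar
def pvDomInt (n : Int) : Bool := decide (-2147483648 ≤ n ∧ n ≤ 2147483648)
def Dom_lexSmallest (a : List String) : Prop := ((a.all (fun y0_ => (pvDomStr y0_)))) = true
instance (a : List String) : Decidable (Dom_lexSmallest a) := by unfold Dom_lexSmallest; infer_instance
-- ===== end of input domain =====

-- B replaces A's dict-grouping + per-group sorts + OrderedDict rebuild by ONE stable sort under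
-- the composite key min(s)+s and a single join (objective: simpler).

-- ===== PORT A =====
def lexSmallest (a : List String) : String :=
  let dic : PySem.Dict Int (List String) :=
    a.foldl (fun dic i =>
      let split_str := i.toList
      -- ord(split_str[0]) / ord(split_str[j]): Python raises IndexError on ""; Pre_ excludes that, the .getD 'A' is unreached
      let min_ord : Int :=
        (PySem.List.pyRange 1 (split_str.length : Int)).foldl
          (fun m j => min m ((((PySem.List.pyGet? split_str j).getD 'A').toNat : Int)))
          (((PySem.List.pyGet? split_str 0).getD 'A').toNat : Int)
      if dic.contains min_ord then dic.modify min_ord [] (fun g => g ++ [i])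
      else dic.insert min_ord [i]) PySem.Dict.empty
  -- for i in dic: if len(dic[i]) > 1: dic[i].sort()   (in-place per-key update = map over the items)
  let dic2 := PySem.Dict.mk (dic.items.map (fun p =>
      if 1 < p.2.length then (p.1, PySem.List.sorted p.2 (fun x => x)) else p))
  -- sorted(dic.items()): dict keys are distinct, so Python's tuple comparison is decided by the key alone
  let items := PySem.List.sorted dic2.items (fun p => p.1)
  let res : List Char := items.foldl (fun res p => p.2.foldl (fun res j => res ++ j.toList) res) []
  String.ofList res

-- ===== PORT B =====
-- min(s): Python raises ValueError on ""; Pre_ excludes that, the .getD 'A' is unreached.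
-- min(s) + s (a one-char string concatenated with s) is the cons of that char onto s's chars.
def lexSmallest_alt (a : List String) : String :=
  PySem.Str.join "" (PySem.List.sorted a
    (fun s => String.ofList (((PySem.List.min? s.toList (fun c => c)).getD 'A') :: s.toList)))

-- ===== PRECONDITION & SPEC =====
-- Pre_ excludes lists containing the empty string, on which A raises IndexError (and B ValueError).
def Pre_lexSmallest (a : List String) : Prop := ∀ s ∈ a, s.toList ≠ []
instance (a : List String) : Decidable (Pre_lexSmallest a) := by unfold Pre_lexSmallest; infer_instance
def pvWitness_lexSmallest : List String := ["ba", "a", "cab"]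

def Spec_lexSmallest (a : List String) (out : String) : Prop := out = lexSmallest_alt a
instance (a : List String) (out : String) : Decidable (Spec_lexSmallest a out) := by unfold Spec_lexSmallest; infer_instance

-- ===== CLAIM (what is proved, stated in full; the proofs are below) =====
def Claim_equal_lexSmallest : Prop := ∀ (a : List String), Dom_lexSmallest a → Pre_lexSmallest a → Spec_lexSmallest a (lexSmallest a)

-- ===== LEMMAS AND PROOFS =====

-- the smallest character of s (B's min(s)), A's integer form of it, B's composite key,
-- and the (sorted) group A builds for the key k
def pvMC (s : String) : Char := (PySem.List.min? s.toList (fun c => c)).getD 'A'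
def pvKI (s : String) : Int := ((pvMC s).toNat : Int)
def pvKey (s : String) : String := String.ofList (pvMC s :: s.toList)
def pvG (a : List String) (k : Int) : List String :=
  PySem.List.sorted (a.filter (fun s => pvKI s == k)) (fun x => x)

lemma pvChar_min_toNat (c d : Char) : ((min c d).toNat : Int) = min ((c.toNat : Int)) ((d.toNat : Int)) := by
  rcases le_total c d with h | h
  · have hn : c.toNat ≤ d.toNat := UInt32.le_iff_toNat_le.mp h
    simp [min_eq_left h, min_eq_left (by exact_mod_cast hn : (c.toNat : Int) ≤ (d.toNat : Int))]
  · have hn : d.toNat ≤ c.toNat := UInt32.le_iff_toNat_le.mp h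
    simp [min_eq_right h, min_eq_right (by exact_mod_cast hn : (d.toNat : Int) ≤ (c.toNat : Int))]

lemma pvMC_inj_eq {x y : String} (h : pvKI x = pvKI y) : pvMC x = pvMC y := by
  unfold pvKI at h
  exact Char.ext (UInt32.toNat_inj.mp (by exact_mod_cast h))

lemma pvMC_lt {x y : String} (h : pvKI x < pvKI y) : pvMC x < pvMC y := by
  unfold pvKI at h
  exact UInt32.lt_iff_toNat_lt.mpr (by exact_mod_cast h)

-- A's inner min-ord loop computes the code of the smallest character
lemma pvMinLoop (c : Char) (t : List Char) :
    (PySem.List.pyRange 1 (((c :: t).length : Nat) : Int)).foldl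
      (fun m j => min m ((((PySem.List.pyGet? (c :: t) j).getD 'A').toNat : Int)))
      ((c.toNat : Int))
    = (((t.foldl min c).toNat : Int)) := by
  induction t using List.reverseRecOn with
  | nil =>
      have h1 : PySem.List.pyRange 1 ((((0 : Nat) + 1 : Nat)) : Int) = [] := by decide
      simp only [List.length_cons, List.length_nil, List.foldl_nil]
      rw [h1]
      rfl
  | append_singleton t' x ih =>
      have hlen : (((c :: (t' ++ [x])).length : Nat) : Int) = ((t'.length : Int) + 1) + 1 := by
        push_cast [List.length_cons, List.length_append, List.length_nil]; ring
      have hrange : PySem.List.pyRange 1 (((t'.length : Int) + 1) + 1)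
          = PySem.List.pyRange 1 ((t'.length : Int) + 1) ++ [(t'.length : Int) + 1] :=
        PySem.List.pyRange_one_succ_right (by omega)
      rw [hlen, hrange, List.foldl_append]
      have hcong : (PySem.List.pyRange 1 ((t'.length : Int) + 1)).foldl
          (fun m j => min m ((((PySem.List.pyGet? (c :: (t' ++ [x])) j).getD 'A').toNat : Int)))
          ((c.toNat : Int))
          = (PySem.List.pyRange 1 ((t'.length : Int) + 1)).foldl
          (fun m j => min m ((((PySem.List.pyGet? (c :: t') j).getD 'A').toNat : Int)))
          ((c.toNat : Int)) := by
        apply PySem.List.foldl_congr_mem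
        intro acc j hj
        have hb := PySem.List.mem_pyRange_one.mp hj
        lift j to Nat using (by omega)
        have hjl : j < (c :: t').length := by simp; omega
        rw [PySem.List.pyGet?_natCast, PySem.List.pyGet?_natCast,
            show c :: (t' ++ [x]) = (c :: t') ++ [x] from rfl,
            List.getElem?_append_left hjl]
      rw [hcong]
      have ih' : (PySem.List.pyRange 1 ((t'.length : Int) + 1)).foldl
          (fun m j => min m ((((PySem.List.pyGet? (c :: t') j).getD 'A').toNat : Int)))
          ((c.toNat : Int)) = (((t'.foldl min c).toNat : Int)) := by
        have := ih
        simp only [List.length_cons] at this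
        rw [show ((t'.length : Int) + 1) = (((t'.length + 1 : Nat)) : Int) by push_cast; ring]
        exact this
      rw [ih']
      have hget : PySem.List.pyGet? (c :: (t' ++ [x])) ((t'.length : Int) + 1) = some x := by
        rw [show ((t'.length : Int) + 1) = (((t'.length + 1 : Nat)) : Int) by push_cast; ring,
            PySem.List.pyGet?_natCast, show c :: (t' ++ [x]) = (c :: t') ++ [x] from rfl]
        rw [List.getElem?_append_right (by simp)]
        simp
      simp only [List.foldl_cons, List.foldl_nil, hget, Option.getD_some]
      rw [List.foldl_append]
      simp [pvChar_min_toNat]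

lemma pvMinOrd (s : String) (hs : s.toList ≠ []) :
    (PySem.List.pyRange 1 ((s.toList.length : Nat) : Int)).foldl
      (fun m j => min m ((((PySem.List.pyGet? s.toList j).getD 'A').toNat : Int)))
      (((PySem.List.pyGet? s.toList 0).getD 'A').toNat : Int)
    = pvKI s := by
  obtain ⟨c, t, hct⟩ : ∃ c t, s.toList = c :: t := by
    cases h : s.toList with
    | nil => exact absurd h hs
    | cons c t => exact ⟨c, t, rfl⟩
  rw [hct]
  have h0 : PySem.List.pyGet? (c :: t) 0 = some c := by
    rw [show (0 : Int) = ((0 : Nat) : Int) from rfl, PySem.List.pyGet?_natCast]; rfl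
  rw [h0]
  simp only [Option.getD_some]
  rw [pvMinLoop]
  unfold pvKI pvMC
  rw [hct, PySem.List.min?_id_cons]
  simp

-- sorting a list of length ≤ 1 changes nothing
lemma pvSortShort {α : Type} [LinearOrder α] (l : List α) (h : ¬ 1 < l.length) :
    PySem.List.sorted l (fun x => x) = l := by
  match l with
  | [] => rfl
  | [x] => rfl
  | x :: y :: t => simp at h

-- join with the empty separator is flatten
lemma pvJoinFlat (L : List (List Char)) : PySem.Chars.join [] L = L.flatten := by
  match L with
  | [] => simp [PySem.Chars.join_nil]
  | [p] => simp [PySem.Chars.join_singleton]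
  | p :: q :: rest => rw [PySem.Chars.join_cons_cons]; simp [pvJoinFlat (q :: rest)]

lemma pvSumIte (K : List Int) (c : Int) (n : Nat) (hnd : K.Nodup) :
    (K.map (fun k => if c = k then n else 0)).sum = if c ∈ K then n else 0 := by
  induction K with
  | nil => simp
  | cons k K' ih =>
      obtain ⟨hk, hnd'⟩ := List.nodup_cons.mp hnd
      by_cases hc : c = k
      · subst hc
        have : ∀ j ∈ K', (if c = j then n else 0) = 0 := by
          intro j hj
          have : c ≠ j := fun h => hk (h ▸ hj)
          simp [this]
        simp [List.map_congr_left this]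
      · simp [hc, ih hnd', List.mem_cons]

-- the groups, ranged over the distinct keys, partition the input
lemma pvPart (a : List String) :
    ((PySem.Set.ofList (a.map pvKI)).flatMap (fun k => a.filter (fun s => pvKI s == k))).Perm a := by
  rw [List.perm_iff_count]
  intro s
  rw [List.count_flatMap]
  have hterm : ∀ k ∈ PySem.Set.ofList (a.map pvKI),
      (List.count s ∘ fun k => a.filter (fun x => pvKI x == k)) k
      = if pvKI s = k then a.count s else 0 := by
    intro k _
    by_cases h : pvKI s = k
    · simp only [Function.comp_apply]
      rw [List.count_filter (by simp [h])]
      simp [h]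
    · simp only [Function.comp_apply]
      rw [if_neg h]
      rw [List.count_eq_zero]
      intro hmem
      exact h (by simpa using (List.mem_filter.mp hmem).2)
  rw [List.map_congr_left hterm, pvSumIte _ _ _ (PySem.Set.nodup_ofList _)]
  by_cases hs : s ∈ a
  · rw [if_pos ((PySem.Set.mem_ofList _ _).mpr (List.mem_map.mpr ⟨s, hs, rfl⟩))]
  · rw [List.count_eq_zero.mpr hs]
    simp

-- key comparison on strings with equal minimal character
lemma pvKey_le_of_eq {x y : String} (hk : pvKI x = pvKI y) (hxy : x ≤ y) : pvKey x ≤ pvKey y := by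
  unfold pvKey
  rw [pvMC_inj_eq hk, String.le_iff_toList_le, String.toList_ofList, String.toList_ofList]
  rcases lt_or_eq_of_le (String.le_iff_toList_le.mp hxy) with h | h
  · exact le_of_lt (show List.Lex (· < ·) (pvMC y :: x.toList) (pvMC y :: y.toList) from List.Lex.cons h)
  · rw [h]

lemma pvKey_le_of_lt {x y : String} (hk : pvKI x < pvKI y) : pvKey x ≤ pvKey y := by
  unfold pvKey
  rw [String.le_iff_toList_le, String.toList_ofList, String.toList_ofList]
  exact le_of_lt (show List.Lex (· < ·) (pvMC x :: x.toList) (pvMC y :: y.toList) from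
    List.Lex.rel (pvMC_lt hk))

lemma pvKey_inj {x y : String} (h : pvKey x = pvKey y) : x = y := by
  unfold pvKey at h
  have h2 := congrArg String.toList h
  rw [String.toList_ofList, String.toList_ofList, List.cons.injEq] at h2
  exact String.toList_inj.mp h2.2

-- strict pairwise order on the sorted distinct keys
lemma pvKeysSorted (a : List String) :
    (PySem.List.sorted (PySem.Set.ofList (a.map pvKI)) (fun x => x)).Pairwise (· < ·) := by
  have hle := PySem.List.sorted_pairwise (PySem.Set.ofList (a.map pvKI)) (fun x => x)
  have hnd : (PySem.List.sorted (PySem.Set.ofList (a.map pvKI)) (fun x => x)).Nodup :=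
    ((PySem.List.sorted_perm (PySem.Set.ofList (a.map pvKI)) (fun x => x) false).nodup_iff).mpr
      (PySem.Set.nodup_ofList _)
  exact (hle.and hnd).imp (fun h => lt_of_le_of_ne h.1 h.2)

-- THE core equality: A's flattened sorted groups are exactly B's single sort
lemma pvMain (a : List String) :
    ((PySem.List.sorted (PySem.Set.ofList (a.map pvKI)) (fun x => x)).flatMap (pvG a))
    = PySem.List.sorted a pvKey := by
  apply List.Perm.eq_of_pairwise (le := fun s t => pvKey s ≤ pvKey t)
  · intro x y _ _ h1 h2
    exact pvKey_inj (le_antisymm h1 h2)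
  · -- pairwise on the flatMap
    rw [List.flatMap_def, List.pairwise_flatten]
    constructor
    · intro l hl
      obtain ⟨k, hk, rfl⟩ := List.mem_map.mp hl
      have hpw := PySem.List.sorted_pairwise (a.filter (fun s => pvKI s == k)) (fun x => x)
      have hmem : ∀ x ∈ pvG a k, pvKI x = k := by
        intro x hx
        have := (PySem.List.mem_sorted _ _ _ _).mp hx
        simpa using (List.mem_filter.mp this).2
      unfold pvG
      refine List.Pairwise.imp_of_mem ?_ hpw
      intro x y hx hy hxy
      exact pvKey_le_of_eq (by rw [hmem x hx, hmem y hy]) hxy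
    · rw [List.pairwise_map]
      refine List.Pairwise.imp_of_mem ?_ (pvKeysSorted a)
      intro k k' hk hk' hlt x hx y hy
      have hxk : pvKI x = k := by
        have := (PySem.List.mem_sorted _ _ _ _).mp hx
        simpa using (List.mem_filter.mp this).2
      have hyk : pvKI y = k' := by
        have := (PySem.List.mem_sorted _ _ _ _).mp hy
        simpa using (List.mem_filter.mp this).2
      exact pvKey_le_of_lt (by rw [hxk, hyk]; exact hlt)
  · exact PySem.List.sorted_pairwise a pvKey
  · -- permutation
    refine List.Perm.trans ?_ (PySem.List.sorted_perm a pvKey false).symm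
    refine List.Perm.trans
      (List.Perm.flatMap
        (PySem.List.sorted_perm (PySem.Set.ofList (a.map pvKI)) (fun x => x) false)
        (fun k _ => PySem.List.sorted_perm _ _ false))
      (pvPart a)

-- ===== assembling the two sides =====

lemma pvAlt_eq (a : List String) :
    lexSmallest_alt a = String.ofList ((PySem.List.sorted a pvKey).flatMap String.toList) := by
  unfold lexSmallest_alt
  have hkey : (fun s => String.ofList (((PySem.List.min? s.toList (fun c => c)).getD 'A') :: s.toList)) = pvKey := rfl
  rw [hkey]
  rw [← String.toList_inj, String.toList_ofList, PySem.Str.toList_join]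
  simp only [String.toList_empty]
  rw [pvJoinFlat, List.flatMap_def]

theorem lexSmallest_spec : Claim_equal_lexSmallest := by
  intro a _ hpre
  unfold Spec_lexSmallest
  rw [pvAlt_eq]
  unfold lexSmallest
  simp only []
  -- step 1: the building fold is a modify-fold keyed by pvKI
  have hbuild : a.foldl (fun dic i =>
      let split_str := i.toList
      let min_ord : Int :=
        (PySem.List.pyRange 1 (split_str.length : Int)).foldl
          (fun m j => min m ((((PySem.List.pyGet? split_str j).getD 'A').toNat : Int)))
          (((PySem.List.pyGet? split_str 0).getD 'A').toNat : Int)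
      if dic.contains min_ord then dic.modify min_ord [] (fun g => g ++ [i])
      else dic.insert min_ord [i]) PySem.Dict.empty
      = a.foldl (fun d x => d.modify (pvKI x) [] (fun g => g ++ [x])) PySem.Dict.empty := by
    apply PySem.List.foldl_congr_mem
    intro acc x hx
    simp only []
    rw [pvMinOrd x (hpre x hx)]
    by_cases hc : acc.contains (pvKI x) = true
    · rw [if_pos hc]
    · rw [if_neg hc]
      rw [show acc.modify (pvKI x) [] (fun g => g ++ [x])
            = acc.insert (pvKI x) (acc.getD (pvKI x) [] ++ [x]) from rfl,
          PySem.Dict.getD_of_not_contains acc [] (eq_false_of_ne_true hc)]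
      simp
  rw [hbuild]
  set K := PySem.Set.ofList (a.map pvKI) with hK
  set d := a.foldl (fun d x => d.modify (pvKI x) [] (fun g => g ++ [x])) PySem.Dict.empty with hd
  -- keys and lookups of the built dict
  have hkeys : d.keys = K := by
    rw [hd, PySem.Dict.keys_foldl_modify_key a pvKI [] (fun _ x => (fun g => g ++ [x]))]
    rfl
  have hnd : d.keys.Nodup := by
    rw [hd]
    exact PySem.Dict.nodup_keys_foldl_modify_key a pvKI [] _ _ PySem.Dict.nodup_keys_empty
  have hmap : d = (a.map (fun s => (pvKI s, s))).foldl
      (fun d p => d.modify p.1 [] (fun g => g ++ [p.2])) PySem.Dict.empty := by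
    rw [hd, List.foldl_map]
  have hget : ∀ k, d.getD k [] = a.filter (fun s => pvKI s == k) := by
    intro k
    rw [hmap, PySem.Dict.getD_foldl_modify_append]
    simp [PySem.Dict.getD_empty, List.filter_map, Function.comp_def]
  -- the items of the per-group-sorted dict
  have hitems : d.items.map (fun p =>
      if 1 < p.2.length then (p.1, PySem.List.sorted p.2 (fun x => x)) else p)
      = K.map (fun k => (k, pvG a k)) := by
    rw [PySem.Dict.items_eq_map_keys d hnd [], hkeys, List.map_map]
    apply List.map_congr_left
    intro k _
    show (if 1 < (d.getD k []).length
          then (k, PySem.List.sorted (d.getD k []) (fun x => x))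
          else (k, d.getD k [])) = (k, pvG a k)
    split_ifs with h
    · rw [hget k]
      rfl
    · rw [hget k] at h ⊢
      unfold pvG
      rw [pvSortShort _ h]
  rw [hitems]
  -- sorting the items by key = mapping over the sorted keys
  have hsorted : PySem.List.sorted (K.map (fun k => (k, pvG a k))) (fun p => p.1)
      = (PySem.List.sorted K (fun x => x)).map (fun k => (k, pvG a k)) := by
    apply PySem.List.sorted_eq_of_perm_of_pairwise_lt
    · exact (PySem.List.sorted_perm K (fun x => x) false).map _
    · rw [List.pairwise_map]
      exact pvKeysSorted a
  rw [hsorted]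
  -- the concatenation loops flatten everything
  rw [show (fun (res : List Char) (p : Int × List String) =>
        p.2.foldl (fun res j => res ++ j.toList) res)
      = (fun res p => res ++ p.2.flatMap String.toList) from by
        funext res p; rw [PySem.List.foldl_append_eq_flatMap]]
  rw [PySem.List.foldl_append_eq_flatMap, List.nil_append]
  rw [← pvMain a]
  congr 1
  rw [List.flatMap_assoc]
  simp only [List.flatMap_def, List.map_map]
  rfl
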